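-- pv_equiv track=rewrite | github.com/havvanurkaymakci/bitirme-training | backend/aimodels/medical_warnings.py | _calculate_medical_score
-- ===== SOURCE A (Python) =====
-- from typing import List, Dict, Any
--
-- def _calculate_medical_score(alerts: List[Dict[str, Any]]) -> int:
--     """Tıbbi uygunluk skoru hesapla (0-100)"""
--     if not alerts:
--         return 100
--
--     base_score = 100
--
--     for alert in alerts:
--         if alert.get('severity') == 'critical':
--             base_score -= 25
--         elif alert.get('severity') == 'warning':
--             base_score -= 10
--         else:
--             base_score -= 5
--
--     return max(0, base_score)
-- ===== SOURCE B (Python) =====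
-- from typing import List, Dict, Any
--
-- _SEVERITY_PENALTY = {'critical': 25, 'warning': 10}
--
-- def _penalty(alerts: List[Dict[str, Any]]) -> int:
--     """Total penalty, computed by structural recursion on the alert list."""
--     if not alerts:
--         return 0
--     return _SEVERITY_PENALTY.get(alerts[0].get('severity'), 5) + _penalty(alerts[1:])
--
-- def _calculate_medical_score(alerts: List[Dict[str, Any]]) -> int:
--     return max(0, 100 - _penalty(alerts))
-- ===== Notes on version B (the rewrite author's own statement) =====
-- stated objective: alternative
-- what changed: Replaces A's iterative loop that decrements a running score in if/elif branches by a recursive helper that sums penalties taken from a severity->penalty table, subtracting the total from 100 and clamping once; the empty-list early-return disappears since the recursion's base case yields penalty 0.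
import Mathlib
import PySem

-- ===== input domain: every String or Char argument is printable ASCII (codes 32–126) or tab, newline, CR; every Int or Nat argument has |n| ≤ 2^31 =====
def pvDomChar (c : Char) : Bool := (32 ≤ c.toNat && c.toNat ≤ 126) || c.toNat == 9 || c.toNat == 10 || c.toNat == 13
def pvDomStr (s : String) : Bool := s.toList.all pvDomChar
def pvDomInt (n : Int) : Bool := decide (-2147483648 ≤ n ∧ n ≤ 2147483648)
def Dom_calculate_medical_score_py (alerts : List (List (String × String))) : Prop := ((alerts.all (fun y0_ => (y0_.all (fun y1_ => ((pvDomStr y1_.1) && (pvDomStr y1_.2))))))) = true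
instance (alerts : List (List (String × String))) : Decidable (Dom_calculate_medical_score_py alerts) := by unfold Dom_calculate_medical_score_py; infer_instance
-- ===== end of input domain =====

-- B replaces A's running-score loop by a recursive penalty sum over a severity->penalty table, subtracted from 100 and clamped once (objective: alternative).

-- ===== PORT A =====
-- alert.get('severity'): first-match lookup in the association list
def pvSeverity (a : List (String × String)) : Option String :=
  (a.find? (fun p => p.1 == "severity")).map (·.2)

def calculate_medical_score_py (alerts : List (List (String × String))) : Int :=
  if alerts.isEmpty then 100
  else
    max 0 (alerts.foldl (fun base_score alert =>
      if pvSeverity alert = some "critical" then base_score - 25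
      else if pvSeverity alert = some "warning" then base_score - 10
      else base_score - 5) 100)

-- ===== PORT B =====
-- the module-level table _SEVERITY_PENALTY (keys are the Optional[str] severities looked up)
def pvSeverityPenalty : PySem.Dict (Option String) Int :=
  PySem.Dict.ofList [(some "critical", 25), (some "warning", 10)]

-- _penalty: structural recursion on the alert list
def pvPenalty : List (List (String × String)) → Int
  | [] => 0
  | a :: rest => PySem.Dict.getD pvSeverityPenalty (pvSeverity a) 5 + pvPenalty rest

def calculate_medical_score_py_alt (alerts : List (List (String × String))) : Int :=
  max 0 (100 - pvPenalty alerts)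

-- ===== PRECONDITION & SPEC =====
def Spec_calculate_medical_score_py (alerts : List (List (String × String))) (out : Int) : Prop := out = calculate_medical_score_py_alt alerts
instance (alerts : List (List (String × String))) (out : Int) : Decidable (Spec_calculate_medical_score_py alerts out) := by unfold Spec_calculate_medical_score_py; infer_instance

-- ===== CLAIM =====
def Claim_equal_calculate_medical_score_py : Prop := ∀ (alerts : List (List (String × String))), Dom_calculate_medical_score_py alerts → Spec_calculate_medical_score_py alerts (calculate_medical_score_py alerts)

-- ===== LEMMAS AND PROOFS =====

lemma getD_table (s : Option String) :
    PySem.Dict.getD pvSeverityPenalty s 5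
    = if s = some "critical" then 25 else if s = some "warning" then 10 else 5 := by
  have h : pvSeverityPenalty
      = (PySem.Dict.empty.insert (some "critical") 25).insert (some "warning") 10 := by rfl
  rw [h, PySem.Dict.getD_insert, PySem.Dict.getD_insert]
  split_ifs with h1 h2 <;> simp_all [PySem.Dict.getD_empty]

lemma foldA_penalty (alerts : List (List (String × String))) (s : Int) :
    alerts.foldl (fun base_score alert =>
      if pvSeverity alert = some "critical" then base_score - 25
      else if pvSeverity alert = some "warning" then base_score - 10
      else base_score - 5) s
    = s - pvPenalty alerts := by
  induction alerts generalizing s with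
  | nil => simp [pvPenalty]
  | cons a t ih =>
    by_cases hc : pvSeverity a = some "critical"
    · simp [pvPenalty, hc, ih, getD_table]; ring
    · by_cases hw : pvSeverity a = some "warning"
      · simp [pvPenalty, hw, ih, getD_table]; ring
      · simp [pvPenalty, hc, hw, ih, getD_table]; ring

-- ===== VERDICT =====
theorem calculate_medical_score_py_spec : Claim_equal_calculate_medical_score_py := by
  intro alerts _
  unfold Spec_calculate_medical_score_py calculate_medical_score_py calculate_medical_score_py_alt
  cases alerts with
  | nil => simp [pvPenalty]
  | cons a t =>
    simp only [List.isEmpty_cons, Bool.false_eq_true, if_false]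
    rw [foldA_penalty]
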